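-- pv_equiv track=rewrite | github.com/Garden1a-X/code_kg_with_tree-sitter | parser/extract_relation_assignedto.py | skip_non_variable_start
-- ===== SOURCE A (Python) =====
-- def skip_non_variable_start(input_string):
--     if not isinstance(input_string, str):
--         return ""
--
--     without_prefix = ''
--     for i, char in enumerate(input_string):
--         if char.isalpha() or char == '_':
--             without_prefix = input_string[i:]
--             break
--     new_str = without_prefix.split('(')[0]
--
--     for i in range(len(new_str)):
--         sin_index = len(new_str) - i - 1
--         sin_char = new_str[sin_index]
--         if sin_char.isalpha() or sin_char == '_':
--             without_suffix = new_str[:(sin_index+1)]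
--             return without_suffix
--
--     return ""
-- ===== SOURCE B (Python) =====
-- def skip_non_variable_start(input_string):
--     if not isinstance(input_string, str):
--         return ""
--     buffer = []
--     collecting = False
--     last_var = -1
--     for ch in input_string:
--         if not collecting:
--             if ch.isalpha() or ch == '_':
--                 collecting = True
--                 buffer.append(ch)
--                 last_var = 0
--         else:
--             if ch == '(':
--                 break
--             buffer.append(ch)
--             if ch.isalpha() or ch == '_':
--                 last_var = len(buffer) - 1
--     if last_var < 0:
--         return ""
--     return ''.join(buffer[:last_var + 1])
-- ===== Notes on version B (the rewrite author's own statement) =====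
-- stated objective: alternative
-- what changed: A's three passes (scan for the first variable char and slice, split at the first open parenthesis and keep the head, then a backward scan with index arithmetic for the last variable char) are replaced by a single left-to-right state-machine pass that skips the prefix, stops at the open parenthesis, and tracks the index of the last variable char while building the buffer.
import Mathlib
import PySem

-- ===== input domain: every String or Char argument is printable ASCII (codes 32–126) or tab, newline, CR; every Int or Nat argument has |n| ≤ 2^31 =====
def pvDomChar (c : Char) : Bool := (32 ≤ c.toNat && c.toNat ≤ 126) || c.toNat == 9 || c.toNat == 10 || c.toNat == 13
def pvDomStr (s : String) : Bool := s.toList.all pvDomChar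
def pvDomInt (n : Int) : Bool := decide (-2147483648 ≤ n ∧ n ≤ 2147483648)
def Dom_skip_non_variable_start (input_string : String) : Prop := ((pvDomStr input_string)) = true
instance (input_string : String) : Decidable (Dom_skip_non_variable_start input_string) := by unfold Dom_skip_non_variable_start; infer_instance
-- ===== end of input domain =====

-- B replaces A's three passes (prefix scan + split('(') + backward suffix scan) by one
-- left-to-right state-machine pass; objective: alternative (same asymptotic cost).

-- "char.isalpha() or char == '_'" (exact on the ASCII domain)
def pvIsVar (c : Char) : Bool := PySem.Chars.isalpha c || c == '_'

-- ===== PORT A =====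
-- first loop: "for i, char in enumerate(...): if var: without_prefix = input_string[i:]; break"
def pvAPrefix : List Char → List Char
  | [] => []
  | c :: cs => if pvIsVar c then c :: cs else pvAPrefix cs

-- second loop: scans new_str from the END (i = 0.. gives sin_index = len-1-i); here as a
-- recursion over the reversed list; "return new_str[:sin_index+1]" = reverse of what remains
def pvASuffix : List Char → List Char
  | [] => []
  | c :: rest => if pvIsVar c then (c :: rest).reverse else pvASuffix rest

def skip_non_variable_start (input_string : String) : String :=
  let without_prefix := pvAPrefix input_string.toList
  -- "without_prefix.split('(')[0]" = the chars before the first '('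
  let new_str := without_prefix.takeWhile (· ≠ '(')
  String.ofList (pvASuffix new_str.reverse)

-- ===== PORT B =====
-- the single pass of Source B: state = (collecting, buffer, last_var)
def pvBGo : List Char → Bool → List Char → Int → (List Char × Int)
  | [], _, buf, lv => (buf, lv)
  | c :: cs, collecting, buf, lv =>
    if !collecting then
      if pvIsVar c then pvBGo cs true (buf ++ [c]) 0
      else pvBGo cs false buf lv
    else
      if c = '(' then (buf, lv)
      else
        let buf' := buf ++ [c]
        pvBGo cs true buf' (if pvIsVar c then (buf'.length : Int) - 1 else lv)

def skip_non_variable_start_alt (input_string : String) : String :=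
  let r := pvBGo input_string.toList false [] (-1)
  if r.2 < 0 then "" else String.ofList (r.1.take (r.2 + 1).toNat)

-- ===== PRECONDITION & SPEC =====
def Spec_skip_non_variable_start (input_string : String) (out : String) : Prop := out = skip_non_variable_start_alt input_string
instance (input_string : String) (out : String) : Decidable (Spec_skip_non_variable_start input_string out) := by unfold Spec_skip_non_variable_start; infer_instance

-- ===== CLAIM (what is proved, stated in full; the proofs are below) =====
def Claim_equal_skip_non_variable_start : Prop := ∀ (input_string : String), Dom_skip_non_variable_start input_string → Spec_skip_non_variable_start input_string (skip_non_variable_start input_string)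

-- ===== LEMMAS AND PROOFS =====

-- "right trim": drop trailing non-variable chars
def pvRtrim (l : List Char) : List Char := (l.reverse.dropWhile (fun c => !pvIsVar c)).reverse

theorem pvAPrefix_eq_dropWhile (l : List Char) :
    pvAPrefix l = l.dropWhile (fun c => !pvIsVar c) := by
  induction l with
  | nil => rfl
  | cons c cs ih =>
    simp only [pvAPrefix, List.dropWhile_cons]
    by_cases h : pvIsVar c <;> simp [h, ih]

theorem pvASuffix_eq (l : List Char) :
    pvASuffix l = (l.dropWhile (fun c => !pvIsVar c)).reverse := by
  induction l with
  | nil => rfl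
  | cons c cs ih =>
    simp only [pvASuffix, List.dropWhile_cons]
    by_cases h : pvIsVar c <;> simp [h, ih]

theorem pvA_eq (l : List Char) :
    skip_non_variable_start (String.ofList l) =
      String.ofList (pvRtrim ((l.dropWhile (fun c => !pvIsVar c)).takeWhile (· ≠ '('))) := by
  simp [skip_non_variable_start, pvAPrefix_eq_dropWhile, pvASuffix_eq, pvRtrim]

-- the collecting phase of B: the buffer grows by takeWhile (≠ '('), and last_var keeps the
-- invariant "length of pvRtrim buffer, minus one"
theorem pvBGo_collect (cs : List Char) (buf : List Char) :
    pvBGo cs true buf (((pvRtrim buf).length : Int) - 1) =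
      (buf ++ cs.takeWhile (· ≠ '('),
       ((pvRtrim (buf ++ cs.takeWhile (· ≠ '('))).length : Int) - 1) := by
  induction cs generalizing buf with
  | nil => simp [pvBGo]
  | cons c cs ih =>
    by_cases hc : c = '('
    · simp [pvBGo, hc, List.takeWhile_cons]
    · have htk : (c :: cs).takeWhile (· ≠ '(') = c :: cs.takeWhile (· ≠ '(') := by
        simp [List.takeWhile_cons, hc]
      by_cases hv : pvIsVar c
      · have hrt : pvRtrim (buf ++ [c]) = buf ++ [c] := by
          simp [pvRtrim, List.dropWhile_cons, hv]
        have h2 := ih (buf ++ [c])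
        rw [hrt] at h2
        simp only [pvBGo, hc, hv, if_false, if_true, Bool.not_true, htk]
        simpa [List.append_assoc] using h2
      · have hrt : pvRtrim (buf ++ [c]) = pvRtrim buf := by
          simp [pvRtrim, List.dropWhile_cons, hv]
        have h2 := ih (buf ++ [c])
        rw [hrt] at h2
        simp only [pvBGo, hc, hv, if_false, Bool.not_true, htk]
        simpa [List.append_assoc] using h2

-- the skipping phase of B
theorem pvBGo_skip_nil (l : List Char) (h : l.dropWhile (fun c => !pvIsVar c) = []) :
    pvBGo l false [] (-1) = ([], -1) := by
  induction l with
  | nil => rfl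
  | cons c cs ih =>
    by_cases hv : pvIsVar c
    · rw [List.dropWhile_cons_of_neg (by simp [hv])] at h
      cases h
    · rw [List.dropWhile_cons_of_pos (by simp [hv])] at h
      simpa [pvBGo, hv] using ih h

theorem pvBGo_skip_cons (l : List Char) (c : Char) (rest : List Char)
    (h : l.dropWhile (fun c => !pvIsVar c) = c :: rest) :
    pvBGo l false [] (-1) = pvBGo rest true [c] 0 := by
  induction l with
  | nil => cases h
  | cons a as ih =>
    by_cases hv : pvIsVar a
    · rw [List.dropWhile_cons_of_neg (by simp [hv])] at h
      cases h
      simp [pvBGo, hv]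
    · rw [List.dropWhile_cons_of_pos (by simp [hv])] at h
      simpa [pvBGo, hv] using ih h

theorem pv_dropWhile_head (q : Char → Bool) (l : List Char) (c : Char) (rest : List Char)
    (h : l.dropWhile q = c :: rest) : q c = false := by
  induction l with
  | nil => cases h
  | cons a as ih =>
    by_cases hq : q a
    · rw [List.dropWhile_cons_of_pos hq] at h
      exact ih h
    · rw [List.dropWhile_cons_of_neg hq] at h
      cases h
      simpa using hq

theorem pvRtrim_prefix (l : List Char) : l.take (pvRtrim l).length = pvRtrim l := by
  have h : pvRtrim l ++ (l.reverse.takeWhile (fun c => !pvIsVar c)).reverse = l := by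
    rw [pvRtrim, ← List.reverse_append, List.takeWhile_append_dropWhile, List.reverse_reverse]
  nth_rewrite 2 [← h]
  rw [List.take_left]

theorem pv_main (l : List Char) :
    skip_non_variable_start (String.ofList l) = skip_non_variable_start_alt (String.ofList l) := by
  rw [pvA_eq]
  unfold skip_non_variable_start_alt
  rw [String.toList_ofList]
  cases hd : l.dropWhile (fun c => !pvIsVar c) with
  | nil =>
    rw [pvBGo_skip_nil l hd]
    simp [pvRtrim]
  | cons c rest =>
    rw [pvBGo_skip_cons l c rest hd]
    have hv : pvIsVar c = true := by
      have := pv_dropWhile_head (fun c => !pvIsVar c) l c rest hd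
      simpa using this
    have hc : c ≠ '(' := by
      intro h
      rw [h] at hv
      exact absurd hv (by decide)
    have h0 : ((pvRtrim [c]).length : Int) - 1 = 0 := by
      simp [pvRtrim, hv]
    have hcol := pvBGo_collect rest [c]
    rw [h0] at hcol
    rw [hcol]
    rw [show (c :: rest).takeWhile (· ≠ '(') = c :: rest.takeWhile (· ≠ '(') from by
      simp [List.takeWhile_cons, hc]]
    set t := c :: rest.takeWhile (· ≠ '(') with ht
    have hbuf : [c] ++ rest.takeWhile (· ≠ '(') = t := by simp [ht]
    rw [hbuf]
    have hne : pvRtrim t ≠ [] := by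
      intro h0'
      have h1 : t.reverse.dropWhile (fun c => !pvIsVar c) = [] := by
        have := congrArg List.reverse h0'
        simpa [pvRtrim] using this
      have hcm : c ∈ t.reverse := by rw [ht]; simp
      have := (List.dropWhile_eq_nil_iff.mp h1) c hcm
      simp [hv] at this
    have hpos : 0 < (pvRtrim t).length := List.length_pos_iff.mpr hne
    have hlt : ¬ (((pvRtrim t).length : Int) - 1 < 0) := by omega
    simp only [hlt, if_false]
    congr 1
    have h3 : (((pvRtrim t).length : Int) - 1 + 1).toNat = (pvRtrim t).length := by omega
    rw [h3, pvRtrim_prefix]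

-- ===== VERDICT (by name: the statement is the Claim_ definition above) =====
theorem skip_non_variable_start_spec : Claim_equal_skip_non_variable_start := by
  intro s _
  unfold Spec_skip_non_variable_start
  have h := pv_main s.toList
  rw [String.ofList_toList] at h
  exact h
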